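-- pv_equiv track=rewrite | github.com/while-TuRe/A-star-8-Puzzel-Problem | My8Puzzle.py | IsRevND
-- ===== SOURCE A (Python) =====
-- def IsRevND(state):
--     sum = 0
--     for i in range(0, len(state), 1):
--         for j in range(0, len(state[i]), 1):
--             for ii in range(0, i, 1):
--                 for jj in range(0, len(state[i]), 1):
--                     if state[ii][jj] != 0 and state[i][j] != 0 and state[ii][jj] < state[i][j]:
--                         sum += 1
--             for jj in range(0, j, 1):
--                 if state[i][jj] != 0 and state[i][j] != 0 and state[i][jj] < state[i][j]:
--                     sum += 1
--     if sum % 2 == 0: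
--         return True
--     else:
--         return False
-- ===== SOURCE B (Python) =====
-- def IsRevND(state):
--     cells = [v for row in state for v in row if v != 0]
--
--     def sort_count(a):
--         # merge sort returning (sorted a, number of pairs k < l with a[k] < a[l])
--         if len(a) < 2:
--             return a, 0
--         mid = len(a) // 2
--         left, cl = sort_count(a[:mid])
--         right, cr = sort_count(a[mid:])
--         merged = []
--         cross = 0
--         i = j = 0
--         while i < len(left) and j < len(right):
--             if left[i] < right[j]:
--                 cross += len(right) - j
--                 merged.append(left[i])
--                 i += 1
--             else:
--                 merged.append(right[j])
--                 j += 1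
--         merged.extend(left[i:])
--         merged.extend(right[j:])
--         return merged, cl + cr + cross
--
--     _, total = sort_count(cells)
--     return total % 2 == 0
-- ===== Notes on version B (the rewrite author's own statement) =====
-- stated objective: faster
-- what changed: A counts smaller-before-larger nonzero pairs with four nested index loops over the grid (quadratic in the number of cells); B flattens the grid once, filters out zeros, and counts those pairs with a merge-sort that adds the cross-half contributions during each merge, then takes the parity.
-- outside the precondition, e.g. on IsRevND([[2, 1], [3]]): A returns False, B returns True; on IsRevND([[1, 2], [3]]): A returns True, B returns False
import Mathlib
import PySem

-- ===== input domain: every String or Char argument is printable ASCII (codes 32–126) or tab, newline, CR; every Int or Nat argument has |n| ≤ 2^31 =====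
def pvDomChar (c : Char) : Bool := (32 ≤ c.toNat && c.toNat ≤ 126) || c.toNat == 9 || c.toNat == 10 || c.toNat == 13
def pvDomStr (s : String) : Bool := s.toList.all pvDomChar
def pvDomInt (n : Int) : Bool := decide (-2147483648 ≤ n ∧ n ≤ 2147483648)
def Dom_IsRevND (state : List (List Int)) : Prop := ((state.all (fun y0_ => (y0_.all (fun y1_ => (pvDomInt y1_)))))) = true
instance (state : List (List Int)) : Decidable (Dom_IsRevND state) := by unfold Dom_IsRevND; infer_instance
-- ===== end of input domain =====

-- B replaces A's four nested index loops (quadratic in the number of cells) by flatten + merge-sort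
-- pair counting (O(n log n)); equivalence is proved on rectangular grids (Pre_).


-- ===== PORT A =====
def IsRevND (state : List (List Int)) : Bool :=
  let sum : Int :=
    (PySem.List.pyRange 0 (state.length : Int) 1).foldl (fun sum i =>
      (PySem.List.pyRange 0 ((PySem.List.pyGetD state i []).length : Int) 1).foldl (fun sum j =>
        let sum :=
          (PySem.List.pyRange 0 i 1).foldl (fun sum ii =>
            (PySem.List.pyRange 0 ((PySem.List.pyGetD state i []).length : Int) 1).foldl (fun sum jj =>
              if PySem.List.pyGetD (PySem.List.pyGetD state ii []) jj 0 ≠ 0 ∧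
                 PySem.List.pyGetD (PySem.List.pyGetD state i []) j 0 ≠ 0 ∧
                 PySem.List.pyGetD (PySem.List.pyGetD state ii []) jj 0 <
                   PySem.List.pyGetD (PySem.List.pyGetD state i []) j 0
              then sum + 1 else sum) sum) sum
        (PySem.List.pyRange 0 j 1).foldl (fun sum jj =>
          if PySem.List.pyGetD (PySem.List.pyGetD state i []) jj 0 ≠ 0 ∧
             PySem.List.pyGetD (PySem.List.pyGetD state i []) j 0 ≠ 0 ∧
             PySem.List.pyGetD (PySem.List.pyGetD state i []) jj 0 <
               PySem.List.pyGetD (PySem.List.pyGetD state i []) j 0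
          then sum + 1 else sum) sum) sum) 0
  if PySem.Int.mod sum 2 = 0 then true else false

-- ===== PORT B =====
-- the merge of Source B's while loop: counts the pairs (x from the left half, y from the right half) with x < y
def pvMergeCount : List Int → List Int → List Int × Nat
  | [], r => (r, 0)
  | x :: l, [] => (x :: l, 0)
  | x :: l, y :: r =>
    if x < y then
      let p := pvMergeCount l (y :: r)
      (x :: p.1, p.2 + (y :: r).length)
    else
      let p := pvMergeCount (x :: l) r
      (y :: p.1, p.2)

-- Source B's sort_count: merge sort returning (sorted a, number of pairs k < l with a[k] < a[l])
def pvSortCount (a : List Int) : List Int × Nat :=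
  if a.length < 2 then (a, 0)
  else
    let mid := a.length / 2
    let L := pvSortCount (a.take mid)
    let R := pvSortCount (a.drop mid)
    let M := pvMergeCount L.1 R.1
    (M.1, L.2 + R.2 + M.2)
termination_by a.length
decreasing_by
  · simp; omega
  · simp; omega

def IsRevND_alt (state : List (List Int)) : Bool :=
  let cells := state.flatMap (fun row => row.filter (fun v => decide (v ≠ 0)))
  decide ((pvSortCount cells).2 % 2 = 0)

-- ===== PRECONDITION & SPEC =====
-- Pre_ restricts to rectangular grids, the function's natural domain (puzzle boards): on ragged input A
-- raises IndexError when an earlier row is shorter than a later one, and where it does return (row widths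
-- non-increasing) it compares each earlier row only up to the current row's width — an accident of its
-- indexing that no flattening reproduces.
def Pre_IsRevND (state : List (List Int)) : Prop :=
  ∀ r ∈ state, r.length = (state.getD 0 []).length
instance (state : List (List Int)) : Decidable (Pre_IsRevND state) := by
  unfold Pre_IsRevND; infer_instance

def pvWitness_IsRevND : List (List Int) := [[1, 2, 0], [3, 4, 5]]

def Spec_IsRevND (state : List (List Int)) (out : Bool) : Prop := out = IsRevND_alt state
instance (state : List (List Int)) (out : Bool) : Decidable (Spec_IsRevND state out) := by
  unfold Spec_IsRevND; infer_instance

-- ===== CLAIM (what is proved, stated in full; the proofs are below) =====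
def Claim_equal_IsRevND : Prop :=
  ∀ (state : List (List Int)), Dom_IsRevND state → Pre_IsRevND state →
    Spec_IsRevND state (IsRevND state)

-- ===== LEMMAS AND PROOFS =====

def pvCond (x y : Int) : Bool := decide (x ≠ 0) && decide (y ≠ 0) && decide (x < y)

def pairCnt : List Int → Nat
  | [] => 0
  | x :: xs => xs.countP (fun y => pvCond x y) + pairCnt xs

def crossC (l r : List Int) : Nat := (l.map (fun x => r.countP (fun y => pvCond x y))).sum

theorem crossC_cons_left (x : Int) (l r : List Int) :
    crossC (x :: l) r = r.countP (fun y => pvCond x y) + crossC l r := rfl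

theorem crossC_nil_right (l : List Int) : crossC l [] = 0 := by
  simp [crossC]

theorem crossC_cons_right (l : List Int) (y : Int) (r : List Int) :
    crossC l (y :: r) = l.countP (fun x => pvCond x y) + crossC l r := by
  induction l with
  | nil => rfl
  | cons a l ih =>
    simp [crossC_cons_left, List.countP_cons] at *
    omega

theorem crossC_append_left (u v r : List Int) :
    crossC (u ++ v) r = crossC u r + crossC v r := by
  simp [crossC]

theorem crossC_append_right (l u v : List Int) :
    crossC l (u ++ v) = crossC l u + crossC l v := by
  induction u with
  | nil => simp [crossC_nil_right]
  | cons y u ih =>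
    simp only [List.cons_append, crossC_cons_right, ih]
    omega

-- crossC as a sum over the right list
theorem crossC_swap (l r : List Int) :
    crossC l r = (r.map (fun y => l.countP (fun x => pvCond x y))).sum := by
  induction r with
  | nil => simp [crossC_nil_right]
  | cons y r ih =>
    simp [crossC_cons_right, ih]

theorem crossC_singleton (u : List Int) (y : Int) :
    crossC u [y] = u.countP (fun x => pvCond x y) := by
  rw [crossC_swap]; simp

theorem pairCnt_append (u v : List Int) :
    pairCnt (u ++ v) = pairCnt u + crossC u v + pairCnt v := by
  induction u with
  | nil => simp [pairCnt, crossC]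
  | cons x u ih =>
    simp [pairCnt, ih, List.countP_append, crossC_cons_left]
    omega

theorem foldl_pyRange_prefix {α β : Type} (xs : List α) (d : α) (j : Nat) (hj : j ≤ xs.length)
    (f : β → α → β) (init : β) :
    (PySem.List.pyRange 0 (j : Int) 1).foldl (fun acc t => f acc (PySem.List.pyGetD xs t d)) init
      = (xs.take j).foldl f init := by
  have hlen : ((j : Nat) : Int) = ((xs.take j).length : Int) := by
    simp [Nat.min_eq_left hj]
  rw [hlen]
  rw [PySem.List.foldl_congr_mem _ _ (fun acc t => f acc (PySem.List.pyGetD (xs.take j) t d)) init ?_]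
  · exact PySem.List.foldl_pyRange_zero_pyGetD' (xs.take j) d f init
  · intro acc t ht
    obtain ⟨h0, h1⟩ := PySem.List.mem_pyRange_one.mp ht
    have h1' : t < (xs.length : Int) := by
      have : (xs.take j).length ≤ xs.length := by simp
      omega
    show f acc (PySem.List.pyGetD xs t d) = f acc (PySem.List.pyGetD (xs.take j) t d)
    rw [PySem.List.pyGetD_eq_getElem xs d h0 h1', PySem.List.pyGetD_eq_getElem (xs.take j) d h0 h1]
    rw [List.getElem_take]

-- the per-row sum: each position j contributes φ(row[j]) plus the pairs inside the row ending at j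
theorem key_row (row : List Int) (φ : Int → Nat) :
    ((List.range row.length).map (fun j =>
        φ (row.getD j 0) + (row.take j).countP (fun x => pvCond x (row.getD j 0)))).sum
      = (row.map φ).sum + pairCnt row := by
  induction row using List.reverseRecOn with
  | nil => simp [pairCnt]
  | append_singleton row y ih =>
    rw [List.length_append, List.length_singleton, List.range_succ]
    rw [List.map_append, List.sum_append]
    have hcongr : ((List.range row.length).map (fun j =>
        φ ((row ++ [y]).getD j 0) + ((row ++ [y]).take j).countP (fun x => pvCond x ((row ++ [y]).getD j 0)))).sum
        = ((List.range row.length).map (fun j =>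
        φ (row.getD j 0) + (row.take j).countP (fun x => pvCond x (row.getD j 0)))).sum := by
      apply congrArg
      apply List.map_congr_left
      intro j hj
      have hj' : j < row.length := List.mem_range.mp hj
      rw [List.getD_append _ _ _ _ hj', List.take_append_of_le_length (le_of_lt hj')]
    have hlast : (row ++ [y]).getD row.length 0 = y := by
      simp
    have htake : (row ++ [y]).take row.length = row := by
      simp
    rw [hcongr, ih]
    simp only [List.map_cons, List.map_nil, List.sum_cons, List.sum_nil, hlast, htake]
    rw [pairCnt_append, crossC_singleton]
    simp [pairCnt]
    omega

-- the body of A's outer loop, with the current prefix of rows and the current row made explicit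
def pvRowF (prev : List (List Int)) (row : List Int) (s : Int) : Int :=
  (PySem.List.pyRange 0 (row.length : Int) 1).foldl (fun sum j =>
    let sum := prev.foldl (fun sum p =>
      (PySem.List.pyRange 0 (row.length : Int) 1).foldl (fun sum jj =>
        if PySem.List.pyGetD p jj 0 ≠ 0 ∧ PySem.List.pyGetD row j 0 ≠ 0 ∧
           PySem.List.pyGetD p jj 0 < PySem.List.pyGetD row j 0 then sum + 1 else sum) sum) sum
    (PySem.List.pyRange 0 j 1).foldl (fun sum jj =>
      if PySem.List.pyGetD row jj 0 ≠ 0 ∧ PySem.List.pyGetD row j 0 ≠ 0 ∧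
         PySem.List.pyGetD row jj 0 < PySem.List.pyGetD row j 0 then sum + 1 else sum) sum) s

theorem countP_cond_eq (r : List Int) (y : Int) :
    r.countP (fun x => decide (x ≠ 0 ∧ y ≠ 0 ∧ x < y)) = r.countP (fun x => pvCond x y) := by
  apply List.countP_congr
  intro x _
  simp [pvCond]
  tauto

theorem sum_map_natCast {α : Type} (l : List α) (f : α → Nat) :
    (l.map (fun x => ((f x : Nat) : Int))).sum = (((l.map f).sum : Nat) : Int) := by
  induction l with
  | nil => simp
  | cons a l ih => simp only [List.map_cons, List.sum_cons, Nat.cast_add, ih]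

theorem pvRowF_eq (prev : List (List Int)) (row : List Int)
    (h : ∀ p ∈ prev, p.length = row.length) (s : Int) :
    pvRowF prev row s =
      s + ((crossC prev.flatten row : Nat) + (pairCnt row : Nat)) := by
  unfold pvRowF
  -- rewrite the body for every j in range
  rw [PySem.List.foldl_congr_mem _ _ (fun sum j =>
      sum + (((prev.flatten.countP (fun x => pvCond x (PySem.List.pyGetD row j 0))) : Int)
        + ((row.take j.toNat).countP (fun x => pvCond x (PySem.List.pyGetD row j 0)) : Int))) s ?_]
  · -- now a plain accumulate-sum loop
    rw [PySem.List.foldl_add _ _ s]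
    congr 1
    -- turn the range into List.range and apply key_row
    rw [PySem.List.pyRange_one]
    rw [List.map_map]
    simp only [sub_zero, Int.toNat_natCast]
    have : ∀ j ∈ List.range row.length,
        ((fun j : Int => ((prev.flatten.countP (fun x => pvCond x (PySem.List.pyGetD row j 0)) : Int)
          + ((row.take j.toNat).countP (fun x => pvCond x (PySem.List.pyGetD row j 0)) : Int))) ∘
            (fun k : Nat => (0 : Int) + k)) j
        = (fun j : Nat => ((prev.flatten.countP (fun x => pvCond x (row.getD j 0)) : Int)
            + ((row.take j).countP (fun x => pvCond x (row.getD j 0)) : Int))) j := by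
      intro j hj
      simp [PySem.List.pyGetD_natCast]
    rw [List.map_congr_left this]
    have hsum := key_row row (fun y => prev.flatten.countP (fun x => pvCond x y))
    rw [crossC_swap]
    -- cast the Nat identity to Int
    have : ((List.range row.length).map (fun j =>
        ((prev.flatten.countP (fun x => pvCond x (row.getD j 0)) : Int)
          + ((row.take j).countP (fun x => pvCond x (row.getD j 0)) : Int)))).sum
        = (((List.range row.length).map (fun j =>
            prev.flatten.countP (fun x => pvCond x (row.getD j 0))
              + (row.take j).countP (fun x => pvCond x (row.getD j 0)))).sum : Int) := by
      induction (List.range row.length) with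
      | nil => simp
      | cons a l ih => simp only [List.map_cons, List.sum_cons, Nat.cast_add, ih]
    rw [this, hsum]
    push_cast
    ring
  · intro acc j hj
    obtain ⟨h0, h1⟩ := PySem.List.mem_pyRange_one.mp hj
    dsimp only
    have hprev : ∀ (s : Int), prev.foldl (fun s p =>
        (PySem.List.pyRange 0 (row.length : Int) 1).foldl (fun s jj =>
          if PySem.List.pyGetD p jj 0 ≠ 0 ∧ PySem.List.pyGetD row j 0 ≠ 0 ∧
             PySem.List.pyGetD p jj 0 < PySem.List.pyGetD row j 0 then s + 1 else s) s) s
        = s + (((prev.map (fun p => p.countP (fun x => pvCond x (PySem.List.pyGetD row j 0)))).sum : Nat) : Int) := by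
      intro s
      rw [PySem.List.foldl_congr_mem _ _
        (fun s p => s + ((p.countP (fun x => pvCond x (PySem.List.pyGetD row j 0)) : Nat) : Int)) s ?_]
      · rw [PySem.List.foldl_add prev
          (fun p => ((p.countP (fun x => pvCond x (PySem.List.pyGetD row j 0)) : Nat) : Int)) s]
        rw [sum_map_natCast]
      · intro s p hp
        have hlen : ((row.length : Nat) : Int) = ((p.length : Nat) : Int) := by rw [h p hp]
        rw [hlen]
        rw [PySem.List.foldl_pyRange_zero_pyGetD' p 0
          (fun s x => if x ≠ 0 ∧ PySem.List.pyGetD row j 0 ≠ 0 ∧ x < PySem.List.pyGetD row j 0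
            then s + 1 else s) s]
        rw [PySem.List.foldl_ite_add_one
          (fun x => x ≠ 0 ∧ PySem.List.pyGetD row j 0 ≠ 0 ∧ x < PySem.List.pyGetD row j 0) p s]
        rw [countP_cond_eq]
    rw [hprev]
    rw [show j = ((j.toNat : Nat) : Int) from (Int.toNat_of_nonneg h0).symm]
    rw [foldl_pyRange_prefix row 0 j.toNat (by omega)
      (fun sum x => if x ≠ 0 ∧ PySem.List.pyGetD row ((j.toNat : Nat) : Int) 0 ≠ 0 ∧
        x < PySem.List.pyGetD row ((j.toNat : Nat) : Int) 0 then sum + 1 else sum) _]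
    rw [PySem.List.foldl_ite_add_one
      (fun x => x ≠ 0 ∧ PySem.List.pyGetD row ((j.toNat : Nat) : Int) 0 ≠ 0 ∧
        x < PySem.List.pyGetD row ((j.toNat : Nat) : Int) 0) (row.take j.toNat) _]
    rw [countP_cond_eq]
    rw [List.countP_flatten]
    simp only [Int.toNat_natCast]
    have : List.map (List.countP fun x => pvCond x (PySem.List.pyGetD row ((j.toNat : Nat) : Int) 0)) prev
        = List.map (fun p => List.countP (fun x => pvCond x (PySem.List.pyGetD row ((j.toNat : Nat) : Int) 0)) p) prev := rfl
    rw [this]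
    omega

-- A's outer loop as structural recursion over the rows, carrying the processed prefix
def pvGo (prev rest : List (List Int)) (s : Int) : Int :=
  match rest with
  | [] => s
  | r :: rest => pvGo (prev ++ [r]) rest (pvRowF prev r s)

theorem pvGo_append (xs : List (List Int)) : ∀ (prev : List (List Int)) (r : List Int) (s : Int),
    pvGo prev (xs ++ [r]) s = pvRowF (prev ++ xs) r (pvGo prev xs s) := by
  induction xs with
  | nil => intro prev r s; simp [pvGo]
  | cons q xs ih =>
    intro prev r s
    show pvGo (prev ++ [q]) (xs ++ [r]) (pvRowF prev q s) = _
    rw [ih]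
    simp [pvGo]

theorem go_eq (xs : List (List Int)) (init : Int) :
    (PySem.List.pyRange 0 (xs.length : Int) 1).foldl
      (fun s i => pvRowF (xs.take i.toNat) (PySem.List.pyGetD xs i []) s) init
      = pvGo [] xs init := by
  induction xs using List.reverseRecOn generalizing init with
  | nil => simp [pvGo, PySem.List.pyRange_one_eq_nil]
  | append_singleton xs r ih =>
    have hlen : (((xs ++ [r]).length : Nat) : Int) = (xs.length : Int) + 1 := by
      simp
    rw [hlen, PySem.List.pyRange_one_succ_right (by positivity), List.foldl_append]
    rw [PySem.List.foldl_congr_mem _ _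
      (fun s i => pvRowF (xs.take i.toNat) (PySem.List.pyGetD xs i []) s) init ?_]
    · rw [ih]
      simp only [List.foldl_cons, List.foldl_nil]
      rw [pvGo_append]
      congr 1
      · simp
      · rw [PySem.List.pyGetD_natCast]
        simp
    · intro s i hi
      obtain ⟨h0, h1⟩ := PySem.List.mem_pyRange_one.mp hi
      have hi' : i.toNat < xs.length := by omega
      congr 1
      · rw [List.take_append_of_le_length (le_of_lt hi')]
      · rw [PySem.List.pyGetD_eq_getElem _ _ h0 (by simp; omega),
            PySem.List.pyGetD_eq_getElem _ _ h0 (by omega)]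
        rw [List.getElem_append_left]

theorem pvGo_eq (C : Nat) : ∀ (rest prev : List (List Int)) (s : Int),
    (∀ p ∈ prev, p.length = C) → (∀ r ∈ rest, r.length = C) →
    pvGo prev rest s = s + ((crossC prev.flatten rest.flatten + pairCnt rest.flatten : Nat) : Int) := by
  intro rest
  induction rest with
  | nil =>
    intro prev s _ _
    simp [pvGo, crossC_nil_right, pairCnt]
  | cons r rest ih =>
    intro prev s hprev hrest
    show pvGo (prev ++ [r]) rest (pvRowF prev r s) = _
    have hr : r.length = C := hrest r (List.mem_cons_self ..)
    have hprev' : ∀ p ∈ prev ++ [r], p.length = C := by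
      intro p hp
      rcases List.mem_append.mp hp with hp | hp
      · exact hprev p hp
      · rcases List.mem_cons.mp hp with rfl | hp
        · exact hr
        · cases hp
    rw [ih (prev ++ [r]) _ hprev' (fun q hq => hrest q (List.mem_cons_of_mem _ hq))]
    rw [pvRowF_eq prev r (fun p hp => by rw [hprev p hp, hr]) s]
    have hfl : (prev ++ [r]).flatten = prev.flatten ++ r := by simp
    have hfl2 : (r :: rest).flatten = r ++ rest.flatten := by simp
    rw [hfl, hfl2]
    rw [crossC_append_left, crossC_append_right, pairCnt_append]
    omega

def incPairs : List Int → Nat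
  | [] => 0
  | x :: xs => xs.countP (fun y => decide (x < y)) + incPairs xs

def crossLt (l r : List Int) : Nat := (l.map (fun x => r.countP (fun y => decide (x < y)))).sum

theorem crossLt_cons_left (x : Int) (l r : List Int) :
    crossLt (x :: l) r = r.countP (fun y => decide (x < y)) + crossLt l r := rfl

theorem crossLt_cons_right (l : List Int) (y : Int) (r : List Int) :
    crossLt l (y :: r) = l.countP (fun x => decide (x < y)) + crossLt l r := by
  induction l with
  | nil => rfl
  | cons a l ih =>
    simp [crossLt_cons_left, List.countP_cons] at *
    omega

theorem crossLt_perm_left {l l' : List Int} (h : l.Perm l') (r : List Int) :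
    crossLt l r = crossLt l' r := by
  unfold crossLt
  exact (h.map _).sum_eq

theorem crossLt_perm_right (l : List Int) {r r' : List Int} (h : r.Perm r') :
    crossLt l r = crossLt l r' := by
  unfold crossLt
  congr 1
  exact List.map_congr_left (fun x _ => h.countP_eq _)

theorem incPairs_append (u v : List Int) :
    incPairs (u ++ v) = incPairs u + crossLt u v + incPairs v := by
  induction u with
  | nil => simp [incPairs, crossLt]
  | cons x u ih =>
    simp [incPairs, ih, List.countP_append, crossLt_cons_left]
    omega

theorem pvMergeCount_spec : ∀ (l r : List Int), l.Pairwise (· ≤ ·) → r.Pairwise (· ≤ ·) →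
    (pvMergeCount l r).1.Perm (l ++ r) ∧ (pvMergeCount l r).1.Pairwise (· ≤ ·) ∧
      (pvMergeCount l r).2 = crossLt l r := by
  intro l r hl hr
  induction l, r using pvMergeCount.induct with
  | case1 r => simpa [pvMergeCount, crossLt] using hr
  | case2 x l => simpa [pvMergeCount, crossLt] using hl
  | case3 x l y r hlt ih =>
    obtain ⟨hp, hs, hc⟩ := ih (List.Pairwise.of_cons hl) hr
    refine ⟨?_, ?_, ?_⟩
    · simp only [pvMergeCount, if_pos hlt]
      exact (hp.cons x)
    · simp only [pvMergeCount, if_pos hlt]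
      refine hs.cons ?_
      intro z hz
      have : z ∈ l ++ (y :: r) := hp.mem_iff.mp hz
      rcases List.mem_append.mp this with h1 | h1
      · exact (List.pairwise_cons.mp hl).1 z h1
      · rcases List.mem_cons.mp h1 with rfl | h1
        · exact le_of_lt hlt
        · exact le_of_lt (lt_of_lt_of_le hlt ((List.pairwise_cons.mp hr).1 z h1))
    · simp only [pvMergeCount, if_pos hlt]
      have hall : (y :: r).countP (fun z => decide (x < z)) = (y :: r).length := by
        rw [List.countP_eq_length]
        intro z hz
        rcases List.mem_cons.mp hz with rfl | hz
        · simpa using hlt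
        · simpa using lt_of_lt_of_le hlt ((List.pairwise_cons.mp hr).1 z hz)
      simp [crossLt_cons_left, hc, hall]
      omega
  | case4 x l y r hlt ih =>
    obtain ⟨hp, hs, hc⟩ := ih hl (List.Pairwise.of_cons hr)
    have hyx : y ≤ x := not_lt.mp hlt
    refine ⟨?_, ?_, ?_⟩
    · simp only [pvMergeCount, if_neg hlt]
      refine (hp.cons y).trans ?_
      exact List.perm_middle.symm
    · simp only [pvMergeCount, if_neg hlt]
      refine hs.cons ?_
      intro z hz
      have : z ∈ (x :: l) ++ r := hp.mem_iff.mp hz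
      rcases List.mem_append.mp this with h1 | h1
      · rcases List.mem_cons.mp h1 with rfl | h1
        · exact hyx
        · exact hyx.trans ((List.pairwise_cons.mp hl).1 z h1)
      · exact (List.pairwise_cons.mp hr).1 z h1
    · simp only [pvMergeCount, if_neg hlt]
      have hz : (x :: l).countP (fun z => decide (z < y)) = 0 := by
        rw [List.countP_eq_zero]
        intro z hz
        rcases List.mem_cons.mp hz with rfl | hz
        · simpa using not_lt.mpr hyx
        · simpa using not_lt.mpr (hyx.trans ((List.pairwise_cons.mp hl).1 z hz))
      rw [crossLt_cons_right, hz, hc]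
      omega

theorem pvSortCount_spec : ∀ (a : List Int),
    (pvSortCount a).1.Perm a ∧ (pvSortCount a).1.Pairwise (· ≤ ·) ∧
      (pvSortCount a).2 = incPairs a := by
  intro a
  induction a using pvSortCount.induct with
  | case1 a h =>
    rw [pvSortCount, if_pos h]
    refine ⟨List.Perm.refl a, ?_, ?_⟩
    · match a, h with
      | [], _ => simp
      | [x], _ => simp
    · match a, h with
      | [], _ => simp [incPairs]
      | [x], _ => simp [incPairs]
  | case2 a h mid ihL ihR =>
    obtain ⟨pL, sL, cL⟩ := ihL
    obtain ⟨pR, sR, cR⟩ := ihR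
    obtain ⟨pM, sM, cM⟩ := pvMergeCount_spec _ _ sL sR
    rw [pvSortCount, if_neg h]
    refine ⟨pM.trans ((pL.append pR).trans (by rw [List.take_append_drop])), sM, ?_⟩
    show (pvSortCount (List.take mid a)).2 + (pvSortCount (List.drop mid a)).2 +
        (pvMergeCount (pvSortCount (List.take mid a)).1 (pvSortCount (List.drop mid a)).1).2 = incPairs a
    rw [cM, cL, cR]
    have h2 := incPairs_append (a.take mid) (a.drop mid)
    rw [List.take_append_drop] at h2
    rw [crossLt_perm_left pL _, crossLt_perm_right _ pR]
    omega

theorem pairCnt_eq_incPairs_filter : ∀ (xs : List Int),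
    pairCnt xs = incPairs (xs.filter (fun v => decide (v ≠ 0))) := by
  intro xs
  induction xs with
  | nil => rfl
  | cons x xs ih =>
    by_cases hx : x = 0
    · subst hx
      have hz : xs.countP (fun y => pvCond 0 y) = 0 := by
        rw [List.countP_eq_zero]
        intro y _
        simp [pvCond]
      simp [pairCnt, hz, ih]
    · simp only [pairCnt, List.filter_cons, decide_eq_true_eq, if_pos hx, incPairs, ih]
      have : xs.countP (fun y => pvCond x y)
          = (xs.filter (fun v => decide (v ≠ 0))).countP (fun y => decide (x < y)) := by
        rw [List.countP_filter]
        apply List.countP_congr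
        intro y _
        simp [pvCond, hx]
        tauto
      omega

-- the literal body of A's outer loop equals pvRowF on the row prefix
theorem bodyA_eq (state : List (List Int)) (i : Int) (h0 : 0 ≤ i) (h1 : i < (state.length : Int))
    (s : Int) :
    (PySem.List.pyRange 0 ((PySem.List.pyGetD state i []).length : Int) 1).foldl (fun sum j =>
      let sum :=
        (PySem.List.pyRange 0 i 1).foldl (fun sum ii =>
          (PySem.List.pyRange 0 ((PySem.List.pyGetD state i []).length : Int) 1).foldl (fun sum jj =>
            if PySem.List.pyGetD (PySem.List.pyGetD state ii []) jj 0 ≠ 0 ∧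
               PySem.List.pyGetD (PySem.List.pyGetD state i []) j 0 ≠ 0 ∧
               PySem.List.pyGetD (PySem.List.pyGetD state ii []) jj 0 <
                 PySem.List.pyGetD (PySem.List.pyGetD state i []) j 0
            then sum + 1 else sum) sum) sum
      (PySem.List.pyRange 0 j 1).foldl (fun sum jj =>
        if PySem.List.pyGetD (PySem.List.pyGetD state i []) jj 0 ≠ 0 ∧
           PySem.List.pyGetD (PySem.List.pyGetD state i []) j 0 ≠ 0 ∧
           PySem.List.pyGetD (PySem.List.pyGetD state i []) jj 0 <
             PySem.List.pyGetD (PySem.List.pyGetD state i []) j 0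
        then sum + 1 else sum) sum) s
      = pvRowF (state.take i.toNat) (PySem.List.pyGetD state i []) s := by
  rw [show i = ((i.toNat : Nat) : Int) from (Int.toNat_of_nonneg h0).symm]
  unfold pvRowF
  apply PySem.List.foldl_congr_mem
  intro sum j hj
  dsimp only
  congr 1
  exact foldl_pyRange_prefix state [] i.toNat (by omega)
    (fun sum p =>
      (PySem.List.pyRange 0 ((PySem.List.pyGetD state ((i.toNat : Nat) : Int) []).length : Int) 1).foldl
        (fun sum jj =>
          if PySem.List.pyGetD p jj 0 ≠ 0 ∧
             PySem.List.pyGetD (PySem.List.pyGetD state ((i.toNat : Nat) : Int) []) j 0 ≠ 0 ∧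
             PySem.List.pyGetD p jj 0 <
               PySem.List.pyGetD (PySem.List.pyGetD state ((i.toNat : Nat) : Int) []) j 0
          then sum + 1 else sum) sum) sum

-- ===== VERDICT (by name: the statement is the Claim_ definition above) =====
theorem IsRevND_spec : Claim_equal_IsRevND := by
  unfold Claim_equal_IsRevND
  intro state _ hpre
  unfold Spec_IsRevND IsRevND IsRevND_alt
  dsimp only
  set n := pairCnt state.flatten with hn
  have hsum : (PySem.List.pyRange 0 (state.length : Int) 1).foldl (fun sum i =>
      (PySem.List.pyRange 0 ((PySem.List.pyGetD state i []).length : Int) 1).foldl (fun sum j =>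
        let sum :=
          (PySem.List.pyRange 0 i 1).foldl (fun sum ii =>
            (PySem.List.pyRange 0 ((PySem.List.pyGetD state i []).length : Int) 1).foldl (fun sum jj =>
              if PySem.List.pyGetD (PySem.List.pyGetD state ii []) jj 0 ≠ 0 ∧
                 PySem.List.pyGetD (PySem.List.pyGetD state i []) j 0 ≠ 0 ∧
                 PySem.List.pyGetD (PySem.List.pyGetD state ii []) jj 0 <
                   PySem.List.pyGetD (PySem.List.pyGetD state i []) j 0
              then sum + 1 else sum) sum) sum
        (PySem.List.pyRange 0 j 1).foldl (fun sum jj =>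
          if PySem.List.pyGetD (PySem.List.pyGetD state i []) jj 0 ≠ 0 ∧
             PySem.List.pyGetD (PySem.List.pyGetD state i []) j 0 ≠ 0 ∧
             PySem.List.pyGetD (PySem.List.pyGetD state i []) jj 0 <
               PySem.List.pyGetD (PySem.List.pyGetD state i []) j 0
          then sum + 1 else sum) sum) sum) 0 = ((n : Nat) : Int) := by
    rw [PySem.List.foldl_congr_mem _ _
      (fun s i => pvRowF (state.take i.toNat) (PySem.List.pyGetD state i []) s) 0 ?_]
    · rw [go_eq]
      rw [pvGo_eq ((state.getD 0 []).length) state [] 0 (by intro p hp; cases hp) hpre]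
      simp [crossC, hn]
    · intro s i hi
      obtain ⟨h0, h1⟩ := PySem.List.mem_pyRange_one.mp hi
      exact bodyA_eq state i h0 h1 s
  rw [hsum]
  have hcells : state.flatMap (fun row => row.filter (fun v => decide (v ≠ 0)))
      = state.flatten.filter (fun v => decide (v ≠ 0)) := by
    rw [List.filter_flatten]
    simp [List.flatMap_def]
  rw [hcells]
  rw [(pvSortCount_spec (state.flatten.filter (fun v => decide (v ≠ 0)))).2.2]
  rw [← pairCnt_eq_incPairs_filter, ← hn]
  have hmod : PySem.Int.mod ((n : Nat) : Int) 2 = ((n % 2 : Nat) : Int) := by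
    simp
  rw [hmod]
  by_cases h2 : n % 2 = 0
  · simp [h2]
  · simp [h2]
    omega
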